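-- pv_equiv track=rewrite | github.com/Ernest51/etude8-bible-api | backend/server.py | generate_smart_fallback_explanation
-- ===== SOURCE A (Python) =====
-- def generate_smart_fallback_explanation(verse_text: str, book: str, chap: int, vnum: int) -> str:
--     """Génère une explication ULTRA-ENRICHIE intelligente sans LLM."""
--
--     low = verse_text.lower()
--     explanations = []
--
--     # I. ANALYSE TEXTUELLE APPROFONDIE
--     explanations.append(f"**ANALYSE TEXTUELLE DE {book} {chap}:{vnum}**")
--
--     # Contexte littéraire spécialisé par livre
--     advanced_contexts = {
--         "Genèse": f"Dans le récit primordial de la création (Ma'aseh Bereshit), ce verset {vnum} révèle l'ordre cosmogonique divin et établit les fondements ontologiques de la réalité. La structure hébraïque du texte massorétique déploie une théologie de la transcendance créatrice.",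
--         "Exode": f"Ce passage du récit de l'Exode (Sefer Shemot) s'inscrit dans la théologie de la libération sotériologique. Le verset {vnum} articule la dialectique entre l'oppression pharaonique et la rédemption yahviste, préfigurant l'œuvre messianique.",
--         "Psaumes": f"Cette expression du psautier davidique (Tehillim) constitue une théophanie poétique révélant l'intimité de l'alliance. Le verset {vnum} exprime la spiritualité hébraïque authentique dans sa relation covenantale avec YHWH.",
--         "Jean": f"Dans le quatrième évangile johannique, ce logion du verset {vnum} déploie la christologie haute et révèle l'économie trinitaire. La théologie johannique articule l'incarnation du Logos et la sotériologie pneumatique.",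
--         "Romains": f"Cette péricope de l'épître paulinienne développe la théologie de la justification (dikaiôsis). Le verset {vnum} explicite la doctrine de la grâce souveraine et l'imputation de la justice christique."
--     }
--
--     explanations.append(advanced_contexts.get(book, f"Ce texte de {book} s'inscrit dans l'économie révélationnelle progressive et manifeste l'herméneutique christocentrique de l'Écriture."))
--
--     # II. ANALYSE LEXICALE ET GRAMMATICALE AVANCÉE
--     explanations.append("**ANALYSE LEXICALE :**")
--
--     if any(word in low for word in ["créa", "commencement", "dieu créa", "בראשית", "ברא"]):
--         explanations.append("Le terme hébraïque 'bara' (ברא) exprime la création ex nihilo, activité exclusive de la divinité. 'Bereshit' (בראשית) indique l'inauguration absolue du temps cosmique. 'Elohim' (אלהים), pluriel d'intensité, révèle la majesté trinitaire préfigurée dans l'économie créatrice.")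
--
--     if any(word in low for word in ["lumière", "soit", "dit", "אור", "יהי"]):
--         explanations.append("La formule performative 'yehi or' (יהי אור) constitue le premier fiat divin, révélant l'efficacité de la Parole créatrice (dabar). Cette lumière primordiale (or rishon) précède ontologiquement les luminaires, évoquant la nature métaphysique de la révélation divine.")
--
--     if any(word in low for word in ["image", "ressemblance", "tselem", "demut", "צלם"]):
--         explanations.append("Le concept d'image divine (tselem Elohim - צלם אלהים) et de ressemblance (demut - דמות) établit l'anthropologie biblique. Cette imago Dei comprend la rationalité (mens), la volonté libre (liberum arbitrium) et la capacité relationnelle, corrompue par la chute mais restaurée en Christ, l'image parfaite du Père.")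
--
--     if any(word in low for word in ["alliance", "berith", "brit", "ברית"]):
--         explanations.append("Le concept d'alliance (berith - ברית) structure l'histoire du salut selon le modèle suzerain-vassal du Proche-Orient ancien. Cette disposition covenantale révèle la fidélité de YHWH (hesed - חסד) et préfigure la nouvelle alliance (berith hadashah) ratifiée par le sang christique.")
--
--     if any(word in low for word in ["amour", "agape", "hesed", "אהבה"]):
--         explanations.append("L'amour divin (ahavah - אהבה) se manifeste comme hesed (חסד - fidélité covenantale) dans l'AT et agapè (ἀγάπη) dans le NT. Cette agapè inconditionnelle culmine dans le sacrifice propitiatoire du Calvaire, révélant la philanthropie divine (Tite 3:4).")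
--
--     if any(word in low for word in ["foi", "aman", "pistis", "אמן", "πίστις"]):
--         explanations.append("La foi biblique ('emunah - אמונה/pistis - πίστις) implique la confiance fiduciale (fiducia), l'assentiment intellectuel (assensus) et la connaissance salvifique (notitia). Instrument de la justification (sola fide), elle unit le croyant au Christ par l'union mystique.")
--
--     # III. THÉOLOGIE SYSTÉMATIQUE
--     explanations.append("**IMPLICATIONS DOGMATIQUES :**")
--
--     if book in ["Genèse"]:
--         explanations.append("Ce texte fonde la théologie de la création contre le panthéisme, le dualisme et l'évolutionnisme athée. La creatio ex nihilo affirme la transcendance divine et établit la distinction Créateur-créature, base de toute métaphysique biblique.")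
--     elif book in ["Jean"]:
--         explanations.append("Cette péricope articule la christologie chalcédonienne (deux natures, une personne) et la théologie trinitaire. L'incarnation du Logos révèle l'économie immanente de la Trinité et accomplit l'œuvre de réconciliation.")
--     elif book in ["Romains"]:
--         explanations.append("Ce passage développe la sotériologie réformée : dépravation totale, élection inconditionnelle, expiation limitée, grâce irrésistible et persévérance des saints. La justification sola gratia exclut toute coopération synergiste.")
--
--     # IV. PERSPECTIVE HISTORICO-RÉDEMPTRICE
--     explanations.append("**ÉCONOMIE DU SALUT :**")
--
--     cristocentrique_apps = {
--         "Genèse": "Cette vérité créationnelle trouve son accomplissement dans l'œuvre du Logos incarné, agent de la création (Jean 1:3, Col 1:16) et de la nouvelle création (2 Cor 5:17). Christ, dernier Adam, restaure l'image divine déchue.",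
--         "Exode": "Cette libération typologique préfigure l'exode spirituel accompli par Christ, notre Pâque (1 Cor 5:7). L'agneau pascal anticipe l'Agneau de Dieu qui ôte le péché du monde (Jean 1:29).",
--         "Psaumes": "Ce psaume messianique trouve son accomplissement en Christ, Fils de David selon la chair (Rom 1:3), qui règne à la droite du Père (Ps 110:1, Héb 1:3).",
--         "Jean": "Cette révélation johannique manifeste l'unité essentielle du Fils avec le Père (homoousios) et la mission sotériologique du Verbe incarné pour le salut du cosmos.",
--         "Romains": "Cette exposition sotériologique révèle l'œuvre substitutionnaire du Christ, qui devient péché pour nous afin que nous devenions justice de Dieu en lui (2 Cor 5:21)."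
--     }
--
--     explanations.append(cristocentrique_apps.get(book, "Ce passage révèle un aspect de l'œuvre rédemptrice du Christ et de son application par l'Esprit Saint dans l'ordo salutis."))
--
--     # V. RÉFÉRENCES PATRISTIQUES ET RÉFORMÉES
--     explanations.append("**CONSENSUS PATRUM :**")
--
--     patristique_refs = {
--         "Genèse": "Augustin (Conf. XI) médite sur l'éternité créatrice de Dieu. Basile de Césarée (Hexaemeron) développe la théologie de la création. Calvin (Inst. I.14) explicite la doctrine de la providence.",
--         "Jean": "Athanase d'Alexandrie défend l'homoousios contre l'arianisme. Jean Chrysostome développe l'exégèse christologique. Luther redécouvre la justification sola fide.",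
--         "Romains": "Augustin contre Pélage articule la doctrine de la grâce. Thomas d'Aquin systématise la théologie de la justification. Calvin explicite la prédestination double.",
--     }
--
--     explanations.append(patristique_refs.get(book, "Les Pères de l'Église et les Réformateurs ont développé l'herméneutique christocentrique de ce passage dans la tradition orthodoxe."))
--
--     # VI. APPLICATION PASTORALE
--     explanations.append("**IMPLICATIONS PASTORALES :** Cette vérité théologique transforme la vie chrétienne par la sanctification progressive (theosis), nourrit la piété réformée et oriente la mission évangélique ad majorem Dei gloriam.")
--
--     return " ".join(explanations)
-- ===== SOURCE B (Python) =====
-- def generate_smart_fallback_explanation(verse_text: str, book: str, chap: int, vnum: int) -> str: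
--     """Declarative rewrite: the whole document is one literal rule list
--     (fixed text / book-keyed table with optional default / keyword-guarded text)
--     rendered by a single interpreter and joined."""
--     low = verse_text.lower()
--
--     def render(rule):
--         tag = rule[0]
--         if tag == "fixed":
--             return [rule[1]]
--         if tag == "book":
--             table, default = rule[1], rule[2]
--             if default is None:
--                 return [table[book]] if book in table else []
--             return [table.get(book, default)]
--         # tag == "kw"
--         words, text = rule[1], rule[2]
--         return [text] if any(w in low for w in words) else []
--
--     rules = [
--         ("fixed", f"**ANALYSE TEXTUELLE DE {book} {chap}:{vnum}**"),
--         ("book", {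
--             "Genèse": f"Dans le récit primordial de la création (Ma'aseh Bereshit), ce verset {vnum} révèle l'ordre cosmogonique divin et établit les fondements ontologiques de la réalité. La structure hébraïque du texte massorétique déploie une théologie de la transcendance créatrice.",
--             "Exode": f"Ce passage du récit de l'Exode (Sefer Shemot) s'inscrit dans la théologie de la libération sotériologique. Le verset {vnum} articule la dialectique entre l'oppression pharaonique et la rédemption yahviste, préfigurant l'œuvre messianique.",
--             "Psaumes": f"Cette expression du psautier davidique (Tehillim) constitue une théophanie poétique révélant l'intimité de l'alliance. Le verset {vnum} exprime la spiritualité hébraïque authentique dans sa relation covenantale avec YHWH.",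
--             "Jean": f"Dans le quatrième évangile johannique, ce logion du verset {vnum} déploie la christologie haute et révèle l'économie trinitaire. La théologie johannique articule l'incarnation du Logos et la sotériologie pneumatique.",
--             "Romains": f"Cette péricope de l'épître paulinienne développe la théologie de la justification (dikaiôsis). Le verset {vnum} explicite la doctrine de la grâce souveraine et l'imputation de la justice christique."
--         }, f"Ce texte de {book} s'inscrit dans l'économie révélationnelle progressive et manifeste l'herméneutique christocentrique de l'Écriture."),
--         ("fixed", "**ANALYSE LEXICALE :**"),
--         ("kw", ["créa", "commencement", "dieu créa", "בראשית", "ברא"],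
--          "Le terme hébraïque 'bara' (ברא) exprime la création ex nihilo, activité exclusive de la divinité. 'Bereshit' (בראשית) indique l'inauguration absolue du temps cosmique. 'Elohim' (אלהים), pluriel d'intensité, révèle la majesté trinitaire préfigurée dans l'économie créatrice."),
--         ("kw", ["lumière", "soit", "dit", "אור", "יהי"],
--          "La formule performative 'yehi or' (יהי אור) constitue le premier fiat divin, révélant l'efficacité de la Parole créatrice (dabar). Cette lumière primordiale (or rishon) précède ontologiquement les luminaires, évoquant la nature métaphysique de la révélation divine."),
--         ("kw", ["image", "ressemblance", "tselem", "demut", "צלם"],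
--          "Le concept d'image divine (tselem Elohim - צלם אלהים) et de ressemblance (demut - דמות) établit l'anthropologie biblique. Cette imago Dei comprend la rationalité (mens), la volonté libre (liberum arbitrium) et la capacité relationnelle, corrompue par la chute mais restaurée en Christ, l'image parfaite du Père."),
--         ("kw", ["alliance", "berith", "brit", "ברית"],
--          "Le concept d'alliance (berith - ברית) structure l'histoire du salut selon le modèle suzerain-vassal du Proche-Orient ancien. Cette disposition covenantale révèle la fidélité de YHWH (hesed - חסד) et préfigure la nouvelle alliance (berith hadashah) ratifiée par le sang christique."),
--         ("kw", ["amour", "agape", "hesed", "אהבה"],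
--          "L'amour divin (ahavah - אהבה) se manifeste comme hesed (חסד - fidélité covenantale) dans l'AT et agapè (ἀγάπη) dans le NT. Cette agapè inconditionnelle culmine dans le sacrifice propitiatoire du Calvaire, révélant la philanthropie divine (Tite 3:4)."),
--         ("kw", ["foi", "aman", "pistis", "אמן", "πίστις"],
--          "La foi biblique ('emunah - אמונה/pistis - πίστις) implique la confiance fiduciale (fiducia), l'assentiment intellectuel (assensus) et la connaissance salvifique (notitia). Instrument de la justification (sola fide), elle unit le croyant au Christ par l'union mystique."),
--         ("fixed", "**IMPLICATIONS DOGMATIQUES :**"),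
--         ("book", {
--             "Genèse": "Ce texte fonde la théologie de la création contre le panthéisme, le dualisme et l'évolutionnisme athée. La creatio ex nihilo affirme la transcendance divine et établit la distinction Créateur-créature, base de toute métaphysique biblique.",
--             "Jean": "Cette péricope articule la christologie chalcédonienne (deux natures, une personne) et la théologie trinitaire. L'incarnation du Logos révèle l'économie immanente de la Trinité et accomplit l'œuvre de réconciliation.",
--             "Romains": "Ce passage développe la sotériologie réformée : dépravation totale, élection inconditionnelle, expiation limitée, grâce irrésistible et persévérance des saints. La justification sola gratia exclut toute coopération synergiste.",
--         }, None),
--         ("fixed", "**ÉCONOMIE DU SALUT :**"),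
--         ("book", {
--             "Genèse": "Cette vérité créationnelle trouve son accomplissement dans l'œuvre du Logos incarné, agent de la création (Jean 1:3, Col 1:16) et de la nouvelle création (2 Cor 5:17). Christ, dernier Adam, restaure l'image divine déchue.",
--             "Exode": "Cette libération typologique préfigure l'exode spirituel accompli par Christ, notre Pâque (1 Cor 5:7). L'agneau pascal anticipe l'Agneau de Dieu qui ôte le péché du monde (Jean 1:29).",
--             "Psaumes": "Ce psaume messianique trouve son accomplissement en Christ, Fils de David selon la chair (Rom 1:3), qui règne à la droite du Père (Ps 110:1, Héb 1:3).",
--             "Jean": "Cette révélation johannique manifeste l'unité essentielle du Fils avec le Père (homoousios) et la mission sotériologique du Verbe incarné pour le salut du cosmos.",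
--             "Romains": "Cette exposition sotériologique révèle l'œuvre substitutionnaire du Christ, qui devient péché pour nous afin que nous devenions justice de Dieu en lui (2 Cor 5:21)."
--         }, "Ce passage révèle un aspect de l'œuvre rédemptrice du Christ et de son application par l'Esprit Saint dans l'ordo salutis."),
--         ("fixed", "**CONSENSUS PATRUM :**"),
--         ("book", {
--             "Genèse": "Augustin (Conf. XI) médite sur l'éternité créatrice de Dieu. Basile de Césarée (Hexaemeron) développe la théologie de la création. Calvin (Inst. I.14) explicite la doctrine de la providence.",
--             "Jean": "Athanase d'Alexandrie défend l'homoousios contre l'arianisme. Jean Chrysostome développe l'exégèse christologique. Luther redécouvre la justification sola fide.",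
--             "Romains": "Augustin contre Pélage articule la doctrine de la grâce. Thomas d'Aquin systématise la théologie de la justification. Calvin explicite la prédestination double.",
--         }, "Les Pères de l'Église et les Réformateurs ont développé l'herméneutique christocentrique de ce passage dans la tradition orthodoxe."),
--         ("fixed", "**IMPLICATIONS PASTORALES :** Cette vérité théologique transforme la vie chrétienne par la sanctification progressive (theosis), nourrit la piété réformée et oriente la mission évangélique ad majorem Dei gloriam."),
--     ]
--
--     return " ".join(s for rule in rules for s in render(rule))
-- ===== Notes on version B (the rewrite author's own statement) =====
-- stated objective: alternative
-- what changed: B replaces A's imperative sequence of section-specific append blocks with a declarative rule list (fixed text / book-keyed table with optional default / keyword-guarded text) interpreted by one render function and flattened into the joined output.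
import Mathlib
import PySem

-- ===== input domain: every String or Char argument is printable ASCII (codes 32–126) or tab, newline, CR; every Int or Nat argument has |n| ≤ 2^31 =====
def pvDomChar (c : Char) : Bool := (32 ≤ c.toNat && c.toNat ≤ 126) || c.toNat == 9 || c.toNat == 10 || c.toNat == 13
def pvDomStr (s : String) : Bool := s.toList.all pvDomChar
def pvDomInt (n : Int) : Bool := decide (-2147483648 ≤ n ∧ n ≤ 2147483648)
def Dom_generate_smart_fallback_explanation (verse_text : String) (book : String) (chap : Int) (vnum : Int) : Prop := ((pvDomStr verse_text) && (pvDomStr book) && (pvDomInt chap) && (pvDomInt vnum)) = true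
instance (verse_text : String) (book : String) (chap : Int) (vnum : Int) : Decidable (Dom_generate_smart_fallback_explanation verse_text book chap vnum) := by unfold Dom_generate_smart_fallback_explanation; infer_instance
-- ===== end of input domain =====

-- B restates the document as one declarative rule list (fixed / book-keyed / keyword-guarded)
-- rendered by a single interpreter; objective: alternative (same cost, different decomposition).

-- ===== PORT A =====
def generate_smart_fallback_explanation (verse_text : String) (book : String) (chap : Int) (vnum : Int) : String :=
  let low := PySem.Str.lower verse_text
  let explanations : List String := []
  let explanations := explanations ++ ["**ANALYSE TEXTUELLE DE " ++ book ++ " " ++ PySem.Int.toStr chap ++ ":" ++ PySem.Int.toStr vnum ++ "**"]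
  let advanced_contexts : PySem.Dict String String := PySem.Dict.ofList [("Genèse", "Dans le récit primordial de la création (Ma'aseh Bereshit), ce verset " ++ PySem.Int.toStr vnum ++ " révèle l'ordre cosmogonique divin et établit les fondements ontologiques de la réalité. La structure hébraïque du texte massorétique déploie une théologie de la transcendance créatrice."), ("Exode", "Ce passage du récit de l'Exode (Sefer Shemot) s'inscrit dans la théologie de la libération sotériologique. Le verset " ++ PySem.Int.toStr vnum ++ " articule la dialectique entre l'oppression pharaonique et la rédemption yahviste, préfigurant l'œuvre messianique."), ("Psaumes", "Cette expression du psautier davidique (Tehillim) constitue une théophanie poétique révélant l'intimité de l'alliance. Le verset " ++ PySem.Int.toStr vnum ++ " exprime la spiritualité hébraïque authentique dans sa relation covenantale avec YHWH."), ("Jean", "Dans le quatrième évangile johannique, ce logion du verset " ++ PySem.Int.toStr vnum ++ " déploie la christologie haute et révèle l'économie trinitaire. La théologie johannique articule l'incarnation du Logos et la sotériologie pneumatique."), ("Romains", "Cette péricope de l'épître paulinienne développe la théologie de la justification (dikaiôsis). Le verset " ++ PySem.Int.toStr vnum ++ " explicite la doctrine de la grâce souveraine et l'imputation de la justice christiq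ue.")]
  let explanations := explanations ++ [advanced_contexts.getD book ("Ce texte de " ++ book ++ " s'inscrit dans l'économie révélationnelle progressive et manifeste l'herméneutique christocentrique de l'Écriture.")]
  let explanations := explanations ++ ["**ANALYSE LEXICALE :**"]
  let explanations := explanations ++ (if (["créa", "commencement", "dieu créa", "בראשית", "ברא"]).any (fun word => PySem.Str.isIn word low) then ["Le terme hébraïque 'bara' (ברא) exprime la création ex nihilo, activité exclusive de la divinité. 'Bereshit' (בראשית) indique l'inauguration absolue du temps cosmique. 'Elohim' (אלהים), pluriel d'intensité, révèle la majesté trinitaire préfigurée dans l'économie créatrice."] else [])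
  let explanations := explanations ++ (if (["lumière", "soit", "dit", "אור", "יהי"]).any (fun word => PySem.Str.isIn word low) then ["La formule performative 'yehi or' (יהי אור) constitue le premier fiat divin, révélant l'efficacité de la Parole créatrice (dabar). Cette lumière primordiale (or rishon) précède ontologiquement les luminaires, évoquant la nature métaphysique de la révélation divine."] else [])
  let explanations := explanations ++ (if (["image", "ressemblance", "tselem", "demut", "צלם"]).any (fun word => PySem.Str.isIn word low) then ["Le concept d'image divine (tselem Elohim - צלם אלהים) et de ressemblance (demut - דמות) établit l'anthropologie biblique. Cette imago Dei comprend la rationalité (mens), la volonté libre (liberum arbitrium) et la capacité relationnelle, corrompue par la chute mais restaurée en Christ, l'image parfaite du Père."] else [])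
  let explanations := explanations ++ (if (["alliance", "berith", "brit", "ברית"]).any (fun word => PySem.Str.isIn word low) then ["Le concept d'alliance (berith - ברית) structure l'histoire du salut selon le modèle suzerain-vassal du Proche-Orient ancien. Cette disposition covenantale révèle la fidélité de YHWH (hesed - חסד) et préfigure la nouvelle alliance (berith hadashah) ratifiée par le sang christique."] else [])
  let explanations := explanations ++ (if (["amour", "agape", "hesed", "אהבה"]).any (fun word => PySem.Str.isIn word low) then ["L'amour divin (ahavah - אהבה) se manifeste comme hesed (חסד - fidélité covenantale) dans l'AT et agapè (ἀγάπη) dans le NT. Cette agapè inconditionnelle culmine dans le sacrifice propitiatoire du Calvaire, révélant la philanthropie divine (Tite 3:4)."] else [])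
  let explanations := explanations ++ (if (["foi", "aman", "pistis", "אמן", "πίστις"]).any (fun word => PySem.Str.isIn word low) then ["La foi biblique ('emunah - אמונה/pistis - πίστις) implique la confiance fiduciale (fiducia), l'assentiment intellectuel (assensus) et la connaissance salvifique (notitia). Instrument de la justification (sola fide), elle unit le croyant au Christ par l'union mystique."] else [])
  let explanations := explanations ++ ["**IMPLICATIONS DOGMATIQUES :**"]
  let explanations := explanations ++
    (if ["Genèse"].contains book then ["Ce texte fonde la théologie de la création contre le panthéisme, le dualisme et l'évolutionnisme athée. La creatio ex nihilo affirme la transcendance divine et établit la distinction Créateur-créature, base de toute métaphysique biblique."]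
     else if ["Jean"].contains book then ["Cette péricope articule la christologie chalcédonienne (deux natures, une personne) et la théologie trinitaire. L'incarnation du Logos révèle l'économie immanente de la Trinité et accomplit l'œuvre de réconciliation."]
     else if ["Romains"].contains book then ["Ce passage développe la sotériologie réformée : dépravation totale, élection inconditionnelle, expiation limitée, grâce irrésistible et persévérance des saints. La justification sola gratia exclut toute coopération synergiste."]
     else [])
  let explanations := explanations ++ ["**ÉCONOMIE DU SALUT :**"]
  let cristocentrique_apps : PySem.Dict String String := PySem.Dict.ofList [("Genèse", "Cette vérité créationnelle trouve son accomplissement dans l'œuvre du Logos incarné, agent de la création (Jean 1:3, Col 1:16) et de la nouvelle création (2 Cor 5:17). Christ, dernier Adam, restaure l'image divine déchue."), ("Exode", "Cette libération typologique préfigure l'exode spirituel accompli par Christ, notre Pâque (1 Cor 5:7). L'agneau pascal anticipe l'Agneau de Dieu qui ôte le péché du monde (Jean 1:29)."), ("Psaumes", "Ce psaume messianique trouve son accomplissement en Christ, Fils de David selon la chair (Rom 1:3), qui règne à la droite du Père (Ps 110:1, Héb 1:3)."), ("Jean", "Cette révélation johannique manifeste l'unité essentielle du Fils avec le Père (homoousios)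 et la mission sotériologique du Verbe incarné pour le salut du cosmos."), ("Romains", "Cette exposition sotériologique révèle l'œuvre substitutionnaire du Christ, qui devient péché pour nous afin que nous devenions justice de Dieu en lui (2 Cor 5:21).")]
  let explanations := explanations ++ [cristocentrique_apps.getD book ("Ce passage révèle un aspect de l'œuvre rédemptrice du Christ et de son application par l'Esprit Saint dans l'ordo salutis.")]
  let explanations := explanations ++ ["**CONSENSUS PATRUM :**"]
  let patristique_refs : PySem.Dict String String := PySem.Dict.ofList [("Genèse", "Augustin (Conf. XI) médite sur l'éternité créatrice de Dieu. Basile de Césarée (Hexaemeron) développe la théologie de la création. Calvin (Inst. I.14) explicite la doctrine de la providence."), ("Jean", "Athanase d'Alexandrie défend l'homoousios contre l'arianisme. Jean Chrysostome développe l'exégèse christologique. Luther redécouvre la justification sola fide."), ("Romains", "Augustin contre Pélage articule la doctrine de la grâce. Thomas d'Aquin systématise la théologie de la justification. Calvin explicite la prédestination double.")]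
  let explanations := explanations ++ [patristique_refs.getD book ("Les Pères de l'Église et les Réformateurs ont développé l'herméneutique christocentrique de ce passage dans la tradition orthodoxe.")]
  let explanations := explanations ++ ["**IMPLICATIONS PASTORALES :** Cette vérité théologique transforme la vie chrétienne par la sanctification progressive (theosis), nourrit la piété réformée et oriente la mission évangélique ad majorem Dei gloriam."]
  PySem.Str.join " " explanations

-- ===== PORT B =====
-- B's rule language: a document is a list of rules, each rendering to 0 or 1 strings.
inductive PvRule where
  | fixed : String → PvRule
  | byBook : List (String × String) → Option String → PvRule
  | kw : List String → String → PvRule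

-- interpreter: `render` from Source B (table[book] under the `book in table` guard is ported
-- as getD with an unreachable "" default, exact since the guard holds)
def pvRender (book low : String) : PvRule → List String
  | PvRule.fixed t => [t]
  | PvRule.byBook table default =>
      let d := PySem.Dict.ofList table
      match default with
      | none => if d.contains book then [d.getD book ""] else []
      | some dflt => [d.getD book dflt]
  | PvRule.kw words text => if words.any (fun w => PySem.Str.isIn w low) then [text] else []

def generate_smart_fallback_explanation_alt (verse_text : String) (book : String) (chap : Int) (vnum : Int) : String :=
  let low := PySem.Str.lower verse_text
  let rules : List PvRule := [
    PvRule.fixed ("**ANALYSE TEXTUELLE DE " ++ book ++ " " ++ PySem.Int.toStr chap ++ ":" ++ PySem.Int.toStr vnum ++ "**"),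
    PvRule.byBook [("Genèse", "Dans le récit primordial de la création (Ma'aseh Bereshit), ce verset " ++ PySem.Int.toStr vnum ++ " révèle l'ordre cosmogonique divin et établit les fondements ontologiques de la réalité. La structure hébraïque du texte massorétique déploie une théologie de la transcendance créatrice."), ("Exode", "Ce passage du récit de l'Exode (Sefer Shemot) s'inscrit dans la théologie de la libération sotériologique. Le verset " ++ PySem.Int.toStr vnum ++ " articule la dialectique entre l'oppression pharaonique et la rédemption yahviste, préfigurant l'œuvre messianique."), ("Psaumes", "Cette expression du psautier davidique (Tehillim) constitue une théophanie poétique révélant l'intimité de l'alliance. Le verset " ++ PySem.Int.toStr vnum ++ " exprime la spiritualité hébraïque authentique dans sa relation covenantale avec YHWH."), ("Jean", "Dans le quatrième évangile johannique, ce logion du verset " ++ PySem.Int.toStr vnum ++ " déploie la christologie haute et révèle l'économie trinitaire. La théologie johannique articule l'incarnation du Logos et la sotériologie pneumatique."), ("Romains", "Cette péricope de l'épître paulinienne développe la théologie de la justification (dikaiôsis). Le verset " ++ PySem.Int.toStr vnum ++ " explicite la doctrine de la grâce souveraine et l'imputation de la justice christique.")]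
      (some ("Ce texte de " ++ book ++ " s'inscrit dans l'économie révélationnelle progressive et manifeste l'herméneutique christocentrique de l'Écriture.")),
    PvRule.fixed "**ANALYSE LEXICALE :**",
    PvRule.kw ["créa", "commencement", "dieu créa", "בראשית", "ברא"] "Le terme hébraïque 'bara' (ברא) exprime la création ex nihilo, activité exclusive de la divinité. 'Bereshit' (בראשית) indique l'inauguration absolue du temps cosmique. 'Elohim' (אלהים), pluriel d'intensité, révèle la majesté trinitaire préfigurée dans l'économie créatrice.",
    PvRule.kw ["lumière", "soit", "dit", "אור", "יהי"] "La formule performative 'yehi or' (יהי אור) constitue le premier fiat divin, révélant l'efficacité de la Parole créatrice (dabar). Cette lumière primordiale (or rishon) précède ontologiquement les luminaires, évoquant la nature métaphysique de la révélation divine.",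
    PvRule.kw ["image", "ressemblance", "tselem", "demut", "צלם"] "Le concept d'image divine (tselem Elohim - צלם אלהים) et de ressemblance (demut - דמות) établit l'anthropologie biblique. Cette imago Dei comprend la rationalité (mens), la volonté libre (liberum arbitrium) et la capacité relationnelle, corrompue par la chute mais restaurée en Christ, l'image parfaite du Père.",
    PvRule.kw ["alliance", "berith", "brit", "ברית"] "Le concept d'alliance (berith - ברית) structure l'histoire du salut selon le modèle suzerain-vassal du Proche-Orient ancien. Cette disposition covenantale révèle la fidélité de YHWH (hesed - חסד) et préfigure la nouvelle alliance (berith hadashah) ratifiée par le sang christique.",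
    PvRule.kw ["amour", "agape", "hesed", "אהבה"] "L'amour divin (ahavah - אהבה) se manifeste comme hesed (חסד - fidélité covenantale) dans l'AT et agapè (ἀγάπη) dans le NT. Cette agapè inconditionnelle culmine dans le sacrifice propitiatoire du Calvaire, révélant la philanthropie divine (Tite 3:4).",
    PvRule.kw ["foi", "aman", "pistis", "אמן", "πίστις"] "La foi biblique ('emunah - אמונה/pistis - πίστις) implique la confiance fiduciale (fiducia), l'assentiment intellectuel (assensus) et la connaissance salvifique (notitia). Instrument de la justification (sola fide), elle unit le croyant au Christ par l'union mystique.",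
    PvRule.fixed "**IMPLICATIONS DOGMATIQUES :**",
    PvRule.byBook [("Genèse", "Ce texte fonde la théologie de la création contre le panthéisme, le dualisme et l'évolutionnisme athée. La creatio ex nihilo affirme la transcendance divine et établit la distinction Créateur-créature, base de toute métaphysique biblique."), ("Jean", "Cette péricope articule la christologie chalcédonienne (deux natures, une personne) et la théologie trinitaire. L'incarnation du Logos révèle l'économie immanente de la Trinité et accomplit l'œuvre de réconciliation."), ("Romains", "Ce passage développe la sotériologie réformée : dépravation totale, élection inconditionnelle, expiation limitée, grâce irrésistible et persévérance des saints. La justification sola gratia exclut toute coopération synergiste.")] none,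
    PvRule.fixed "**ÉCONOMIE DU SALUT :**",
    PvRule.byBook [("Genèse", "Cette vérité créationnelle trouve son accomplissement dans l'œuvre du Logos incarné, agent de la création (Jean 1:3, Col 1:16) et de la nouvelle création (2 Cor 5:17). Christ, dernier Adam, restaure l'image divine déchue."), ("Exode", "Cette libération typologique préfigure l'exode spirituel accompli par Christ, notre Pâque (1 Cor 5:7). L'agneau pascal anticipe l'Agneau de Dieu qui ôte le péché du monde (Jean 1:29)."), ("Psaumes", "Ce psaume messianique trouve son accomplissement en Christ, Fils de David selon la chair (Rom 1:3), qui règne à la droite du Père (Ps 110:1, Héb 1:3)."), ("Jean", "Cette révélation johannique manifeste l'unité essentielle du Fils avec le Père (homoousios) et la mission sotériologique du Verbe incarné pour le salut du cosmos."), ("Romains", "Cette exposition sotériologique révèle l'œuvre substitutionnaire du Christ, qui devient péché pour nous afin que nous devenions justice de Dieu en lui (2 Cor 5:21).")]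
      (some "Ce passage révèle un aspect de l'œuvre rédemptrice du Christ et de son application par l'Esprit Saint dans l'ordo salutis."),
    PvRule.fixed "**CONSENSUS PATRUM :**",
    PvRule.byBook [("Genèse", "Augustin (Conf. XI) médite sur l'éternité créatrice de Dieu. Basile de Césarée (Hexaemeron) développe la théologie de la création. Calvin (Inst. I.14) explicite la doctrine de la providence."), ("Jean", "Athanase d'Alexandrie défend l'homoousios contre l'arianisme. Jean Chrysostome développe l'exégèse christologique. Luther redécouvre la justification sola fide."), ("Romains", "Augustin contre Pélage articule la doctrine de la grâce. Thomas d'Aquin systématise la théologie de la justification. Calvin explicite la prédestination double.")]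
      (some "Les Pères de l'Église et les Réformateurs ont développé l'herméneutique christocentrique de ce passage dans la tradition orthodoxe."),
    PvRule.fixed "**IMPLICATIONS PASTORALES :** Cette vérité théologique transforme la vie chrétienne par la sanctification progressive (theosis), nourrit la piété réformée et oriente la mission évangélique ad majorem Dei gloriam."]
  PySem.Str.join " " (rules.flatMap (pvRender book low))

-- ===== PRECONDITION & SPEC =====
def Spec_generate_smart_fallback_explanation (verse_text : String) (book : String) (chap : Int) (vnum : Int) (out : String) : Prop := out = generate_smart_fallback_explanation_alt verse_text book chap vnum
instance (verse_text : String) (book : String) (chap : Int) (vnum : Int) (out : String) : Decidable (Spec_generate_smart_fallback_explanation verse_text book chap vnum out) := by unfold Spec_generate_smart_fallback_explanation; infer_instance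

-- ===== CLAIM =====
def Claim_equal_generate_smart_fallback_explanation : Prop := ∀ (verse_text : String) (book : String) (chap : Int) (vnum : Int), Dom_generate_smart_fallback_explanation verse_text book chap vnum → Spec_generate_smart_fallback_explanation verse_text book chap vnum (generate_smart_fallback_explanation verse_text book chap vnum)

-- ===== LEMMAS AND PROOFS =====
theorem dog_eq (book a b c : String) :
    (if ["Genèse"].contains book then [a]
     else if ["Jean"].contains book then [b]
     else if ["Romains"].contains book then [c]
     else ([] : List String))
      = (if (PySem.Dict.ofList [("Genèse", a), ("Jean", b), ("Romains", c)]).contains book then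
          [(PySem.Dict.ofList [("Genèse", a), ("Jean", b), ("Romains", c)]).getD book ""]
        else []) := by
  simp only [PySem.Dict.ofList, PySem.Dict.update, List.foldl, PySem.Dict.contains_insert,
    PySem.Dict.contains_empty, PySem.Dict.getD_insert, PySem.Dict.getD_empty,
    List.contains_cons, List.contains_nil, Bool.or_false, beq_iff_eq]
  by_cases h1 : book = "Genèse" <;> by_cases h2 : book = "Jean" <;>
    by_cases h3 : book = "Romains" <;> simp_all

set_option maxHeartbeats 1000000 in
theorem gsfe_eq (verse_text book : String) (chap vnum : Int) :
    generate_smart_fallback_explanation verse_text book chap vnum = generate_smart_fallback_explanation_alt verse_text book chap vnum := by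
  unfold generate_smart_fallback_explanation generate_smart_fallback_explanation_alt
  simp only [List.flatMap_cons, List.flatMap_nil, pvRender]
  rw [dog_eq]
  simp only [List.append_assoc, List.cons_append, List.nil_append, List.append_nil]

-- ===== VERDICT =====
theorem generate_smart_fallback_explanation_spec : Claim_equal_generate_smart_fallback_explanation := by
  intro verse_text book chap vnum _
  unfold Spec_generate_smart_fallback_explanation
  exact gsfe_eq verse_text book chap vnum
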